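-- pv_equiv track=rewrite | github.com/luizppbarbosa/UFPE-Introducao-a-Programacao | Provas/prova 2 2020-1 Q1.py | MultiplicaDigitos
-- ===== SOURCE A (Python) =====
-- def MultiplicaDigitos(num):
--     mult = 1
--
--     if num <= 0:
--         mult = -1
--
--     elif num > 999999:
--         mult = -2
--
--     else:
--         lista =[-1]*6
--         pos = 0
--
--         while num != 0:
--             lista[pos] = num % 10
--             num = num // 10
--             pos += 1
--
--         for i in lista:
--             if i != 0 and i != -1:
--                 mult *= i
--
--
--     return mult
-- ===== SOURCE B (Python) =====
-- def MultiplicaDigitos(num):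
--     if num <= 0:
--         return -1
--     if num > 999999:
--         return -2
--     mult = 1
--     for c in str(num):
--         if c != '0':
--             mult *= ord(c) - 48
--     return mult
-- ===== Notes on version B (the rewrite author's own statement) =====
-- stated objective: alternative
-- what changed: B renders the number as its decimal string and multiplies the digit characters most-significant-first, replacing A's arithmetic mod/div extraction into a sentinel-padded fixed-size list and its second pass over that list.
import Mathlib
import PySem

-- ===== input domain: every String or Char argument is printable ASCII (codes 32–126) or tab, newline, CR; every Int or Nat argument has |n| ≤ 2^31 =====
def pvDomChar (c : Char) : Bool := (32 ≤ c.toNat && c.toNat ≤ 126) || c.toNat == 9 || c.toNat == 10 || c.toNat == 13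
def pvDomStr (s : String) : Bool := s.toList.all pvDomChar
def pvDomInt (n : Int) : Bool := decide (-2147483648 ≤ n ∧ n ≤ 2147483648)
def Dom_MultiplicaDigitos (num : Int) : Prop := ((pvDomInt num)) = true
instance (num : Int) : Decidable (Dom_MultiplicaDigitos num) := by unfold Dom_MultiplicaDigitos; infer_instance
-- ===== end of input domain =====

-- B renders the number as its decimal string and multiplies the nonzero digit characters
-- most-significant-first, replacing A's mod/div extraction into a sentinel-padded six-slot
-- list and its second pass over that list (objective: alternative).

-- ===== PORT A =====
-- A's while loop: a fuel of six is a totality guard only; the loop body runs at most six times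
-- since the branch guarantees 0 < num ≤ 999999.
def pvALoop : Nat → Int → List Int → Nat → List Int
  | 0, _, lista, _ => lista
  | f + 1, num, lista, pos =>
    if num ≠ 0 then
      pvALoop f (PySem.Int.floordiv num 10) (lista.set pos (PySem.Int.mod num 10)) (pos + 1)
    else lista

def MultiplicaDigitos (num : Int) : Int :=
  if num ≤ 0 then -1
  else if num > 999999 then -2
  else
    let lista : List Int := [-1, -1, -1, -1, -1, -1]
    let lista := pvALoop 6 num lista 0
    lista.foldl (fun mult i => if i ≠ 0 ∧ i ≠ -1 then mult * i else mult) 1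

-- ===== PORT B =====
def MultiplicaDigitos_alt (num : Int) : Int :=
  if num ≤ 0 then -1
  else if num > 999999 then -2
  else
    (PySem.Int.toStr num).toList.foldl
      (fun mult c => if c ≠ '0' then mult * ((c.toNat : Int) - 48) else mult) 1

-- ===== PRECONDITION & SPEC =====
def Spec_MultiplicaDigitos (num : Int) (out : Int) : Prop := out = MultiplicaDigitos_alt num
instance (num : Int) (out : Int) : Decidable (Spec_MultiplicaDigitos num out) := by unfold Spec_MultiplicaDigitos; infer_instance

-- ===== CLAIM (what is proved, stated in full; the proofs are below) =====
def Claim_equal_MultiplicaDigitos : Prop := ∀ (num : Int), Dom_MultiplicaDigitos num → Spec_MultiplicaDigitos num (MultiplicaDigitos num)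

-- ===== LEMMAS AND PROOFS =====

-- the common value both sides compute: the product of the nonzero decimal digits
def pvDProd : Nat → Int
  | 0 => 1
  | n + 1 =>
    (if (n + 1) % 10 ≠ 0 then ((((n + 1) % 10 : Nat)) : Int) else 1) * pvDProd ((n + 1) / 10)
decreasing_by exact Nat.div_lt_self (Nat.succ_pos n) (by norm_num)

-- ---------- A side ----------

theorem pvFoldl_sentinel (l : List Int) (acc : Int) (h : ∀ x ∈ l, x = -1) :
    l.foldl (fun mult i => if i ≠ 0 ∧ i ≠ -1 then mult * i else mult) acc = acc := by
  induction l generalizing acc with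
  | nil => rfl
  | cons a t ih =>
    have ha : a = -1 := h a (by simp)
    simp only [List.foldl_cons, ha]
    rw [ih _ (fun x hx => h x (by simp [hx]))]
    simp

theorem pvFoldl_set (lista : List Int) (pos : Nat) (d acc : Int)
    (hpos : pos < lista.length)
    (hsuf : ∀ x ∈ lista.drop pos, x = -1)
    (hd : 0 ≤ d) :
    (lista.set pos d).foldl (fun mult i => if i ≠ 0 ∧ i ≠ -1 then mult * i else mult) acc
      = (if d ≠ 0 then (lista.foldl (fun mult i => if i ≠ 0 ∧ i ≠ -1 then mult * i else mult) acc) * d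
         else lista.foldl (fun mult i => if i ≠ 0 ∧ i ≠ -1 then mult * i else mult) acc) := by
  obtain ⟨a, rest, hdrop⟩ : ∃ a rest, lista.drop pos = a :: rest := by
    cases h : lista.drop pos with
    | nil => exfalso; have := List.drop_eq_nil_iff.mp h; omega
    | cons a rest => exact ⟨a, rest, rfl⟩
  have hsplit : lista = lista.take pos ++ a :: rest := by
    rw [← hdrop, List.take_append_drop]
  have hset : lista.set pos d = lista.take pos ++ d :: rest := by
    conv_lhs => rw [hsplit]
    rw [List.set_append]
    simp [List.length_take, Nat.min_eq_left (Nat.le_of_lt hpos)]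
  have hrest : ∀ x ∈ rest, x = -1 := fun x hx => hsuf x (by rw [hdrop]; simp [hx])
  rw [hset]; conv_rhs => rw [hsplit]
  rw [List.foldl_append, List.foldl_append]
  simp only [List.foldl_cons]
  rw [pvFoldl_sentinel rest _ hrest, pvFoldl_sentinel rest _ hrest]
  have ha : a = -1 := hsuf a (by rw [hdrop]; simp)
  have hdne : d ≠ -1 := by omega
  by_cases h0 : d = 0 <;> simp [h0, ha, hdne]

-- A's loop-and-fold computes acc * pvDProd
theorem pvALoop_prod (f : Nat) : ∀ (num : Int) (lista : List Int) (pos : Nat) (acc : Int),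
    0 ≤ num → num < 10 ^ f → pos + f ≤ lista.length →
    (∀ x ∈ lista.drop pos, x = -1) →
    (pvALoop f num lista pos).foldl (fun mult i => if i ≠ 0 ∧ i ≠ -1 then mult * i else mult) acc
      = (lista.foldl (fun mult i => if i ≠ 0 ∧ i ≠ -1 then mult * i else mult) acc) * pvDProd num.toNat := by
  induction f with
  | zero =>
    intro num lista pos acc h0 hlt _ _
    have : num = 0 := by omega
    simp [pvALoop, this, pvDProd]
  | succ f ih =>
    intro num lista pos acc h0 hlt hlen hsuf
    by_cases hz : num = 0
    · simp [pvALoop, hz, pvDProd]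
    · have hmod : PySem.Int.mod num 10 = num % 10 :=
        PySem.Int.mod_eq_emod_of_pos (by norm_num)
      have hdiv : PySem.Int.floordiv num 10 = num / 10 :=
        PySem.Int.floordiv_eq_ediv_of_pos (by norm_num)
      simp only [pvALoop, hz, ne_eq, not_false_eq_true, if_true]
      rw [ih (PySem.Int.floordiv num 10) (lista.set pos (PySem.Int.mod num 10)) (pos + 1) acc
          (by rw [hdiv]; omega)
          (by rw [hdiv]; have : (10:Int) ^ (f + 1) = 10 ^ f * 10 := by ring
              omega)
          (by simp; omega)
          (by intro x hx
              rw [List.drop_set_of_lt (by omega : pos < pos + 1)] at hx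
              have hx' : x ∈ List.drop 1 (List.drop pos lista) := by
                rw [List.drop_drop]; simpa [Nat.add_comm] using hx
              exact hsuf x (List.drop_subset 1 _ hx'))]
      rw [pvFoldl_set lista pos _ acc (by omega) hsuf (by rw [hmod]; omega)]
      -- unfold pvDProd at num.toNat (which is ≠ 0)
      obtain ⟨k, hk⟩ : ∃ k, num.toNat = k + 1 := by
        refine ⟨num.toNat - 1, ?_⟩; omega
      have hmodnat : (PySem.Int.mod num 10) = ((num.toNat % 10 : Nat) : Int) := by
        rw [hmod]; omega
      have hdivnat : (PySem.Int.floordiv num 10).toNat = num.toNat / 10 := by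
        rw [hdiv]; omega
      rw [hk]
      show _ = _ * pvDProd (k + 1)
      rw [pvDProd]
      rw [hdivnat, hk]
      by_cases hm : (k + 1) % 10 = 0
      · have : PySem.Int.mod num 10 = 0 := by rw [hmodnat, hk, hm]; simp
        simp only [this, hm]
        simp [mul_comm]
      · have hne : PySem.Int.mod num 10 ≠ 0 := by
          rw [hmodnat, hk]; exact_mod_cast by omega
        simp only [hne, hm, ne_eq, not_false_eq_true, if_true]
        rw [hmodnat, hk]
        ring

-- ---------- B side ----------

-- stepping B's fold once on digitChar d for d < 10
theorem pvFold_digitChar (d : Nat) (hd : d < 10) (m : Int) (cs : List Char) :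
    ((Nat.digitChar d :: cs).foldl
        (fun mult c => if c ≠ '0' then mult * ((c.toNat : Int) - 48) else mult) m)
      = cs.foldl (fun mult c => if c ≠ '0' then mult * ((c.toNat : Int) - 48) else mult)
          (if d ≠ 0 then m * (d : Int) else m) := by
  simp only [List.foldl_cons]
  congr 1
  interval_cases d <;> simp [Nat.digitChar]

-- B's fold over toDigitsCore output equals fold over the accumulator list with pvDProd folded in
theorem pvCore_prod (f : Nat) : ∀ (n : Nat) (ds : List Char) (m : Int), n < 10 ^ f →
    ((Nat.toDigitsCore 10 f n ds).foldl
        (fun mult c => if c ≠ '0' then mult * ((c.toNat : Int) - 48) else mult) m)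
      = ds.foldl (fun mult c => if c ≠ '0' then mult * ((c.toNat : Int) - 48) else mult)
          (m * pvDProd n) := by
  induction f with
  | zero =>
    intro n ds m hlt
    have : n = 0 := by omega
    simp [Nat.toDigitsCore, this, pvDProd]
  | succ f ih =>
    intro n ds m hlt
    rw [Nat.toDigitsCore]
    by_cases hz : n / 10 = 0
    · simp only [hz, if_true]
      rw [pvFold_digitChar (n % 10) (Nat.mod_lt _ (by norm_num)) m ds]
      have hn : n % 10 = n := by omega
      by_cases h0 : n = 0
      · simp [h0, pvDProd]
      · obtain ⟨k, hk⟩ : ∃ k, n = k + 1 := ⟨n - 1, by omega⟩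
        have hne : n % 10 ≠ 0 := by omega
        have hp : pvDProd n = ((n % 10 : Nat) : Int) := by
          rw [hk, pvDProd, ← hk, hz]
          simp [pvDProd, hne]
        rw [hp]
        simp [hne]
    · simp only [hz, if_false]
      rw [ih (n / 10) _ m (by omega)]
      rw [pvFold_digitChar (n % 10) (Nat.mod_lt _ (by omega)) _ ds]
      congr 1
      obtain ⟨k, hk⟩ : ∃ k, n = k + 1 := ⟨n - 1, by omega⟩
      rw [hk, pvDProd, ← hk]
      by_cases hm : n % 10 = 0
      · simp [hm]
      · simp only [hm, ne_eq, not_false_eq_true, if_true]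
        ring

theorem pvToStr_prod (n : Nat) (hn : 0 < n) :
    ((PySem.Int.toStr (n : Int)).toList.foldl
        (fun mult c => if c ≠ '0' then mult * ((c.toNat : Int) - 48) else mult) 1)
      = pvDProd n := by
  rw [PySem.Int.toList_toStr]
  have hneg : ¬ ((n : Int) < 0) := by omega
  simp only [PySem.Int.toChars, hneg, if_false, Int.toNat_natCast]
  rw [Nat.toDigits]
  have hfuel : n < 10 ^ (n + 1) := by
    calc n < 2 ^ n := Nat.lt_two_pow_self
    _ ≤ 10 ^ n := Nat.pow_le_pow_left (by norm_num) n
    _ ≤ 10 ^ (n + 1) := Nat.pow_le_pow_right (by norm_num) (by omega)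
  rw [pvCore_prod (n + 1) n [] 1 hfuel]
  simp

-- ===== VERDICT (by name: the statement is the Claim_ definition above) =====
theorem MultiplicaDigitos_spec : Claim_equal_MultiplicaDigitos := by
  unfold Claim_equal_MultiplicaDigitos
  intro num _
  unfold Spec_MultiplicaDigitos MultiplicaDigitos MultiplicaDigitos_alt
  by_cases h1 : num ≤ 0
  · simp [h1]
  · by_cases h2 : num > 999999
    · simp [h1, h2]
    · simp only [h1, h2, if_false]
      rw [pvALoop_prod 6 num [-1, -1, -1, -1, -1, -1] 0 1
          (by omega) (by norm_num; omega) (by simp)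
          (by intro x hx; simpa using hx)]
      rw [pvFoldl_sentinel _ 1 (by intro x hx; simpa using hx)]
      have hcast : ((num.toNat : Int)) = num := by omega
      rw [← hcast, pvToStr_prod num.toNat (by omega)]
      simp
      congr 1
      omega
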